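-- pv_equiv track=rewrite | github.com/Imageomics/biocap | wiki_scraper/scraper_ambiguous_names.py | _taxonomy_matches_overlap
-- ===== SOURCE A (Python) =====
-- from typing import Dict, List, Tuple, Optional
--
-- def _norm(txt: str) -> str:
--     return ' '.join(txt.split()).strip().lower()
--
-- def _soft_norm(x: str) -> str:
--     """Looser normalization: e.g., Tracheophyta ~ Tracheophytes."""
--     t = ''.join(ch for ch in x.lower().strip() if ch.isalpha())
--     for suf in ('phyta','phyte','phytes','opsida','idae','inae','oidea','aceae','ales','ina','eae','ae','es','us','a','e','s'):
--         if t.endswith(suf) and len(t) - len(suf) >= 4: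
--             t = t[: -len(suf)]
--             break
--     return t
--
-- def _approx_equal(a: str, b: str) -> bool:
--     return _soft_norm(a) == _soft_norm(b)
--
-- def _taxonomy_matches_overlap(expected: Dict[str, str], rows: List[Tuple[str, str]]) -> bool:
--     """Compare ONLY overlapping standard ranks between wiki (rows) and CSV.
--        Consider ranks: kingdom, phylum, class, order, family, genus (species ignored).
--        If a rank exists in BOTH, it must match (approx or exact). If multiple rows for
--        a rank exist on wiki, the first matching wins.
--     """
--     ranks = ["kingdom", "phylum", "class", "order", "family", "genus"]
--     wiki_by_rank: Dict[str, List[str]] = {rk: [] for rk in ranks}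
--     for lab, val in rows:
--         if lab in wiki_by_rank:
--             wiki_by_rank[lab].append(val)
--
--     for rk in ranks:
--         exp_val = expected.get(rk)
--         if not exp_val:
--             continue
--         exp_norm = _norm(str(exp_val))
--         candidates = wiki_by_rank.get(rk, [])
--         if not candidates:
--             continue
--         matched = False
--         for cand in candidates:
--             if _approx_equal(cand, exp_norm) or cand == exp_norm:
--                 matched = True
--                 break
--         if not matched:
--             return False
--     return True
-- ===== SOURCE B (Python) =====
-- def _norm(txt: str) -> str:
--     return ' '.join(txt.split()).strip().lower()
--
-- def _soft_norm(x: str) -> str: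
--     t = ''.join(ch for ch in x.lower().strip() if ch.isalpha())
--     for suf in ('phyta','phyte','phytes','opsida','idae','inae','oidea','aceae','ales','ina','eae','ae','es','us','a','e','s'):
--         if t.endswith(suf) and len(t) - len(suf) >= 4:
--             t = t[: -len(suf)]
--             break
--     return t
--
-- def _approx_equal(a: str, b: str) -> bool:
--     return _soft_norm(a) == _soft_norm(b)
--
-- def _taxonomy_matches_overlap(expected, rows):
--     """Index-free version: for each rank, scan the rows directly."""
--     for rk in ("kingdom", "phylum", "class", "order", "family", "genus"):
--         exp_val = expected.get(rk)
--         if not exp_val: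
--             continue
--         exp_norm = _norm(str(exp_val))
--         found_candidate = False
--         matched = False
--         for lab, val in rows:
--             if lab == rk:
--                 found_candidate = True
--                 if _approx_equal(val, exp_norm) or val == exp_norm:
--                     matched = True
--                     break
--         if found_candidate and not matched:
--             return False
--     return True
-- ===== Notes on version B (the rewrite author's own statement) =====
-- stated objective: simpler
-- what changed: Removed the wiki_by_rank dict index entirely: instead of building a rank->candidates map in a first pass and looking it up, B scans the rows list directly for each of the six fixed ranks, keeping found_candidate/matched flags with an early break on the first match.
import Mathlib
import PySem

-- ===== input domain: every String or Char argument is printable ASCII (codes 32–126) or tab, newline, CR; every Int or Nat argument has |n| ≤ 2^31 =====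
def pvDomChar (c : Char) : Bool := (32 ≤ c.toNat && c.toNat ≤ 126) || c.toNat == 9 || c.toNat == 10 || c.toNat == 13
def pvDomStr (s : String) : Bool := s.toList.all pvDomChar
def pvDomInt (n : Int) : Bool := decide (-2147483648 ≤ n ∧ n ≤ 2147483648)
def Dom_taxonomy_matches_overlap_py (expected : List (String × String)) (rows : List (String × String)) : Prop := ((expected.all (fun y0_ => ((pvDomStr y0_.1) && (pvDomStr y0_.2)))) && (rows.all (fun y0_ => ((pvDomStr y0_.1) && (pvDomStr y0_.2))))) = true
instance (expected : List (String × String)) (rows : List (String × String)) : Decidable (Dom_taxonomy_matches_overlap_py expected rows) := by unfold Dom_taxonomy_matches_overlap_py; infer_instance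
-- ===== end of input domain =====

-- B drops A's wiki_by_rank dict index and instead scans the rows list directly per rank
-- with found/matched flags (objective: simpler — same result, no index construction).

-- shared module helpers (_norm, _soft_norm, _approx_equal), identical in Source A and Source B
def pvNorm (txt : String) : String :=
  PySem.Str.lower (PySem.Str.strip (PySem.Str.join " " (PySem.Str.split₀ txt)))

def pvSufs : List (List Char) :=
  ["phyta".toList,"phyte".toList,"phytes".toList,"opsida".toList,"idae".toList,"inae".toList,
   "oidea".toList,"aceae".toList,"ales".toList,"ina".toList,"eae".toList,"ae".toList,
   "es".toList,"us".toList,"a".toList,"e".toList,"s".toList]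

-- the suffix loop of _soft_norm (break = stop after the first rewrite);
-- 'len(t) - len(suf) >= 4' on Python ints is exactly 'suf.length + 4 ≤ t.length'
def pvSoftLoop (t : List Char) : List (List Char) → List Char
  | [] => t
  | suf :: rest =>
    if PySem.Chars.endswith t suf && decide (suf.length + 4 ≤ t.length) then
      PySem.Chars.slice t none (some (-(suf.length : Int)))   -- t[:-len(suf)]
    else pvSoftLoop t rest

def pvSoftNorm (x : String) : List Char :=
  pvSoftLoop ((PySem.Chars.strip (PySem.Chars.lower x.toList)).filter PySem.Chars.isalpha) pvSufs

def pvApproxEqual (a b : String) : Bool := pvSoftNorm a == pvSoftNorm b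

def pvRanks : List String := ["kingdom", "phylum", "class", "order", "family", "genus"]

-- ===== PORT A =====
-- inner 'for cand in candidates' loop with its break
def pvMatchLoopA (en : String) : List String → Bool
  | [] => false
  | c :: cs => if pvApproxEqual c en || c == en then true else pvMatchLoopA en cs

-- outer 'for rk in ranks' loop with its early 'return False'
def pvRankLoopA (expd : PySem.Dict String String) (wiki : PySem.Dict String (List String)) :
    List String → Bool
  | [] => true
  | rk :: rest =>
    match expd.get? rk with
    | none => pvRankLoopA expd wiki rest
    | some v =>
      if v == "" then pvRankLoopA expd wiki rest
      else
        let en := pvNorm v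
        let cands := wiki.getD rk []
        if cands == [] then pvRankLoopA expd wiki rest
        else if pvMatchLoopA en cands then pvRankLoopA expd wiki rest
        else false

def taxonomy_matches_overlap_py (expected : List (String × String)) (rows : List (String × String)) : Bool :=
  let wiki0 := pvRanks.foldl (fun d rk => d.insert rk ([] : List String)) PySem.Dict.empty
  let wiki := rows.foldl
    (fun d p => if d.contains p.1 then d.modify p.1 [] (· ++ [p.2]) else d) wiki0
  pvRankLoopA (PySem.Dict.mk expected) wiki pvRanks

-- ===== PORT B =====
-- inner 'for lab, val in rows' scan carrying the found_candidate flag; break on match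
def pvScanRowsB (rk en : String) (found : Bool) : List (String × String) → Bool × Bool
  | [] => (found, false)
  | (lab, val) :: rest =>
    if lab == rk then
      if pvApproxEqual val en || val == en then (true, true)
      else pvScanRowsB rk en true rest
    else pvScanRowsB rk en found rest

def pvRankLoopB (expd : PySem.Dict String String) (rows : List (String × String)) :
    List String → Bool
  | [] => true
  | rk :: rest =>
    match expd.get? rk with
    | none => pvRankLoopB expd rows rest
    | some v =>
      if v == "" then pvRankLoopB expd rows rest
      else
        let en := pvNorm v
        let fm := pvScanRowsB rk en false rows
        if fm.1 && !fm.2 then false else pvRankLoopB expd rows rest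

def taxonomy_matches_overlap_py_alt (expected : List (String × String)) (rows : List (String × String)) : Bool :=
  pvRankLoopB (PySem.Dict.mk expected) rows pvRanks

-- ===== PRECONDITION & SPEC =====
def Spec_taxonomy_matches_overlap_py (expected : List (String × String)) (rows : List (String × String)) (out : Bool) : Prop := out = taxonomy_matches_overlap_py_alt expected rows
instance (expected : List (String × String)) (rows : List (String × String)) (out : Bool) : Decidable (Spec_taxonomy_matches_overlap_py expected rows out) := by unfold Spec_taxonomy_matches_overlap_py; infer_instance

-- ===== CLAIM (what is proved, stated in full; the proofs are below) =====
def Claim_equal_taxonomy_matches_overlap_py : Prop := ∀ (expected : List (String × String)) (rows : List (String × String)), Dom_taxonomy_matches_overlap_py expected rows → Spec_taxonomy_matches_overlap_py expected rows (taxonomy_matches_overlap_py expected rows)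

-- ===== LEMMAS AND PROOFS =====

-- B's row scan = (a candidate exists, first-match result over the rank's candidates in row order)
theorem pvScanRowsB_eq (rk en : String) (rows : List (String × String)) : ∀ (f : Bool),
    pvScanRowsB rk en f rows =
      (f || !((rows.filter (fun p => p.1 == rk)).isEmpty),
       pvMatchLoopA en ((rows.filter (fun p => p.1 == rk)).map (·.2))) := by
  induction rows with
  | nil => intro f; simp [pvScanRowsB, pvMatchLoopA]
  | cons p rest ih =>
    intro f
    obtain ⟨lab, val⟩ := p
    by_cases h : lab = rk
    · subst h
      by_cases hm : (pvApproxEqual val en || val == en) = true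
      · simp [pvScanRowsB, pvMatchLoopA, hm]
      · simp [pvScanRowsB, pvMatchLoopA, hm, ih]
    · simp [pvScanRowsB, pvMatchLoopA, h, ih]

-- the guarded append-fold on the dict, read back at a key it contains
theorem pvWikiFold_getD (rk : String) (rows : List (String × String)) :
    ∀ (d : PySem.Dict String (List String)), d.contains rk = true →
    (rows.foldl (fun d p => if d.contains p.1 then d.modify p.1 [] (· ++ [p.2]) else d) d).getD rk []
      = d.getD rk [] ++ (rows.filter (fun p => p.1 == rk)).map (·.2) := by
  induction rows with
  | nil => intro d _; simp
  | cons p rest ih =>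
    intro d hd
    obtain ⟨lab, val⟩ := p
    by_cases hc : d.contains lab = true
    · have hc' : (d.modify lab [] (· ++ [val])).contains rk = true := by
        rw [PySem.Dict.contains_modify]; simp [hd]
      by_cases h : lab = rk
      · subst h
        simp [hc, ih _ hc', PySem.Dict.getD_modify]
      · simp [hc, ih _ hc', PySem.Dict.getD_modify, Ne.symm h, h]
    · have h : lab ≠ rk := by intro h; rw [h] at hc; exact hc hd
      simp [hc, ih _ hd, h]

-- the two rank loops agree whenever the dict agrees with the direct filter on every remaining rank
theorem pvRankLoop_eq (expd : PySem.Dict String String) (rows : List (String × String))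
    (wiki : PySem.Dict String (List String)) : ∀ (rks : List String),
    (∀ rk ∈ rks, wiki.getD rk [] = (rows.filter (fun p => p.1 == rk)).map (·.2)) →
    pvRankLoopA expd wiki rks = pvRankLoopB expd rows rks := by
  intro rks
  induction rks with
  | nil => intro _; rfl
  | cons rk rest ih =>
    intro h
    have hrk := h rk (by simp)
    have hrest : ∀ r ∈ rest, wiki.getD r [] = (rows.filter (fun p => p.1 == r)).map (·.2) :=
      fun r hr => h r (by simp [hr])
    rw [pvRankLoopA, pvRankLoopB]
    cases hg : expd.get? rk with
    | none => exact ih hrest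
    | some v =>
      by_cases hv : v = ""
      · simp [hv, ih hrest]
      · simp only [hv, beq_iff_eq, if_neg hv]
        rw [pvScanRowsB_eq, hrk]
        by_cases he : (rows.filter (fun p => p.1 == rk)) = []
        · simp [he, ih hrest]
        · have : ((rows.filter (fun p => p.1 == rk)).map (·.2)) ≠ [] := by simpa using he
          by_cases hm : pvMatchLoopA (pvNorm v) ((rows.filter (fun p => p.1 == rk)).map (·.2)) = true
          · simp [this, he, hm, ih hrest]
          · simp [this, he, hm, ih hrest]

-- ===== VERDICT (by name: the statement is the Claim_ definition above) =====
theorem taxonomy_matches_overlap_py_spec : Claim_equal_taxonomy_matches_overlap_py := by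
  intro expected rows _
  unfold Spec_taxonomy_matches_overlap_py taxonomy_matches_overlap_py taxonomy_matches_overlap_py_alt
  apply pvRankLoop_eq
  intro rk hrk
  rw [pvWikiFold_getD]
  · have : ∀ r ∈ pvRanks,
        (pvRanks.foldl (fun d rk => d.insert rk ([] : List String)) PySem.Dict.empty).getD r [] = [] := by
      decide
    rw [this rk hrk]; rfl
  · have : ∀ r ∈ pvRanks,
        (pvRanks.foldl (fun d rk => d.insert rk ([] : List String)) PySem.Dict.empty).contains r = true := by
      decide
    exact this rk hrk
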